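-- pv_equiv track=rewrite | github.com/JRP4/rikiki | NE_card_bot.py | find_best_action
-- ===== SOURCE A (Python) =====
-- def find_best_action(dictionaries):
--     """
--     Find the best action based on accumulated scores.
--
--     Args:
--     dictionaries (list): List of dictionaries containing action scores.
--
--     Returns:
--     dict: A dictionary of actions and their total scores.
--     """
--     def calculate_score(values):
--         """
--         Calculate the score for a set of values.
--
--         Args:
--         values (list): List of numeric values.
--
--         Returns:
--         int: Calculated score.
--         """
--         if len(values) < 2:
--             return 0
--         first = values[0]
--         return sum(first - v for v in values[1:])
--
--     all_scores = {}
--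
--     # Accumulate scores for each action across all dictionaries
--     for d in dictionaries:
--         for key, values in d.items():
--             score = calculate_score(values)
--             if key not in all_scores:
--                 all_scores[key] = score
--             else:
--                 all_scores[key] += score
--
--     if not all_scores:
--         return None
--
--     return all_scores
-- ===== SOURCE B (Python) =====
-- def _closed_score(vs):
--     if len(vs) < 2:
--         return 0
--     return (len(vs) - 1) * vs[0] - sum(vs[1:])
--
--
-- def find_best_action(dictionaries):
--     # Phase 1: group every value-list by its action key, one pass over the input.
--     groups = {}
--     for d in dictionaries:
--         for key, values in d.items():
--             groups.setdefault(key, []).append(values)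
--
--     # Phase 2: reduce each group with the closed-form per-list score.
--     totals = {key: sum(_closed_score(vs) for vs in vlists)
--               for key, vlists in groups.items()}
--
--     return totals or None
-- ===== Notes on version B (the rewrite author's own statement) =====
-- stated objective: simpler
-- what changed: A interleaves scoring and accumulation in one loop with an iterative per-list sum; B first groups all value-lists per key into a dict, then reduces each group with the algebraic closed form (len-1)*v0 - sum(rest).
import Mathlib
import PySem

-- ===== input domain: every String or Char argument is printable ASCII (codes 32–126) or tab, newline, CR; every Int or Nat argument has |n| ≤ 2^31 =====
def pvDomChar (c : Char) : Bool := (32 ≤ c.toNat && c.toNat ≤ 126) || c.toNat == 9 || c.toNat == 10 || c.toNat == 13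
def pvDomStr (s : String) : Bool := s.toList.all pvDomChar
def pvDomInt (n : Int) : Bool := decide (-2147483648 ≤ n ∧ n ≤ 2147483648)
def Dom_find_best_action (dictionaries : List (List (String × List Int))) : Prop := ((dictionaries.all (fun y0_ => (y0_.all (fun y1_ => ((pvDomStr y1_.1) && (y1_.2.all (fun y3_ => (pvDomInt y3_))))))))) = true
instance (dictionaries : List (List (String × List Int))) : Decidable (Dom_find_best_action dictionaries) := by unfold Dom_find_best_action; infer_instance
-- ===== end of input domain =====

-- B changes the decomposition only: group the value-lists per key first, then reduce each
-- group with a closed-form score; same results, chosen for simplicity, not speed.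

-- ===== PORT A =====
-- calculate_score: iterative sum of (first - v) over values[1:]
def pvCalcScore (values : List Int) : Int :=
  if values.length < 2 then 0
  else
    match values with
    | [] => 0
    | first :: rest => rest.foldl (fun acc v => acc + (first - v)) 0

def find_best_action (dictionaries : List (List (String × List Int))) : Option (List (String × Int)) :=
  let all_scores : PySem.Dict String Int :=
    dictionaries.foldl (fun acc d =>
      d.foldl (fun acc kv =>
        let score := pvCalcScore kv.2
        match acc.get? kv.1 with
        | none => acc.insert kv.1 score
        | some old => acc.insert kv.1 (old + score)) acc) PySem.Dict.empty
  if all_scores.items = [] then none else some all_scores.items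

-- ===== PORT B =====
-- closed-form per-list score: (len-1)*vs[0] - sum(vs[1:])
def pvClosedScore (vs : List Int) : Int :=
  if vs.length < 2 then 0
  else
    match vs with
    | [] => 0
    | first :: rest => ((vs.length : Int) - 1) * first - rest.sum

def find_best_action_alt (dictionaries : List (List (String × List Int))) : Option (List (String × Int)) :=
  let groups : PySem.Dict String (List (List Int)) :=
    dictionaries.foldl (fun g d =>
      d.foldl (fun g kv => g.insert kv.1 (g.getD kv.1 [] ++ [kv.2])) g) PySem.Dict.empty
  let totals : List (String × Int) :=
    groups.items.map (fun p => (p.1, (p.2.map pvClosedScore).sum))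
  if totals = [] then none else some totals

-- ===== PRECONDITION & SPEC =====
def Spec_find_best_action (dictionaries : List (List (String × List Int))) (out : Option (List (String × Int))) : Prop := out = find_best_action_alt dictionaries
instance (dictionaries : List (List (String × List Int))) (out : Option (List (String × Int))) : Decidable (Spec_find_best_action dictionaries out) := by unfold Spec_find_best_action; infer_instance

-- ===== CLAIM (what is proved, stated in full; the proofs are below) =====
def Claim_equal_find_best_action : Prop := ∀ (dictionaries : List (List (String × List Int))), Dom_find_best_action dictionaries → Spec_find_best_action dictionaries (find_best_action dictionaries)

-- ===== LEMMAS AND PROOFS =====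

-- the iterative score equals the closed form
theorem pvFoldSub (first : Int) : ∀ (l : List Int) (a : Int),
    l.foldl (fun acc v => acc + (first - v)) a = a + (l.length : Int) * first - l.sum := by
  intro l
  induction l with
  | nil => intro a; simp
  | cons x t ih =>
      intro a
      simp only [List.foldl_cons, List.length_cons, List.sum_cons, ih]
      push_cast
      ring

theorem calc_eq_closed (vs : List Int) : pvCalcScore vs = pvClosedScore vs := by
  unfold pvCalcScore pvClosedScore
  cases vs with
  | nil => simp
  | cons first rest =>
      cases rest with
      | nil => simp
      | cons y t =>
          simp only [pvFoldSub, List.length_cons]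
          push_cast
          ring

-- map the group dict to the score dict
def pvMapF (g : PySem.Dict String (List (List Int))) : PySem.Dict String Int :=
  PySem.Dict.mk (g.items.map (fun p => (p.1, (p.2.map pvClosedScore).sum)))

theorem get?_pvMapF (g : PySem.Dict String (List (List Int))) (k : String) :
    (pvMapF g).get? k = (g.get? k).map (fun ls => (ls.map pvClosedScore).sum) := by
  simp only [pvMapF, PySem.Dict.get?, List.find?_map, Option.map_map]
  rfl

theorem contains_pvMapF (g : PySem.Dict String (List (List Int))) (k : String) :
    (pvMapF g).contains k = g.contains k := by
  simp only [pvMapF, PySem.Dict.contains, List.any_map]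
  rfl

theorem pvMapF_insert (g : PySem.Dict String (List (List Int))) (k : String) (ls : List (List Int)) :
    pvMapF (g.insert k ls) = (pvMapF g).insert k ((ls.map pvClosedScore).sum) := by
  unfold PySem.Dict.insert
  rw [contains_pvMapF]
  by_cases h : g.contains k = true
  · simp only [if_pos h, pvMapF]
    apply PySem.Dict.ext
    simp only [List.map_map]
    apply List.map_congr_left
    intro p _
    by_cases hp : (p.1 == k) = true
    · simp [Function.comp, hp]
    · simp [Function.comp, hp]
  · simp [if_neg h, pvMapF]

theorem pv_step (g : PySem.Dict String (List (List Int))) (k : String) (vs : List Int) :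
    (match (pvMapF g).get? k with
     | none => (pvMapF g).insert k (pvCalcScore vs)
     | some old => (pvMapF g).insert k (old + pvCalcScore vs))
    = pvMapF (g.insert k (g.getD k [] ++ [vs])) := by
  rw [get?_pvMapF]
  cases hg : g.get? k with
  | none =>
      simp only [Option.map_none]
      rw [pvMapF_insert, PySem.Dict.getD, hg]
      simp [calc_eq_closed]
  | some ls =>
      simp only [Option.map_some]
      rw [pvMapF_insert, PySem.Dict.getD, hg]
      simp [calc_eq_closed]

theorem pv_fold_inner (d : List (String × List Int)) :
    ∀ (g : PySem.Dict String (List (List Int))),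
    d.foldl (fun acc kv =>
        let score := pvCalcScore kv.2
        match acc.get? kv.1 with
        | none => acc.insert kv.1 score
        | some old => acc.insert kv.1 (old + score)) (pvMapF g)
      = pvMapF (d.foldl (fun g kv => g.insert kv.1 (g.getD kv.1 [] ++ [kv.2])) g) := by
  induction d with
  | nil => intro g; rfl
  | cons kv t ih =>
      intro g
      simp only [List.foldl_cons]
      rw [pv_step, ih]

theorem pv_fold_outer (ds : List (List (String × List Int))) :
    ∀ (g : PySem.Dict String (List (List Int))),
    ds.foldl (fun acc d =>
      d.foldl (fun acc kv =>
        let score := pvCalcScore kv.2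
        match acc.get? kv.1 with
        | none => acc.insert kv.1 score
        | some old => acc.insert kv.1 (old + score)) acc) (pvMapF g)
      = pvMapF (ds.foldl (fun g d =>
          d.foldl (fun g kv => g.insert kv.1 (g.getD kv.1 [] ++ [kv.2])) g) g) := by
  induction ds with
  | nil => intro g; rfl
  | cons d t ih =>
      intro g
      simp only [List.foldl_cons]
      rw [pv_fold_inner, ih]

-- ===== VERDICT (by name: the statement is the Claim_ definition above) =====
theorem find_best_action_spec : Claim_equal_find_best_action := by
  intro ds _
  unfold Spec_find_best_action
  simp only [find_best_action, find_best_action_alt]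
  have h := pv_fold_outer ds PySem.Dict.empty
  have he : pvMapF PySem.Dict.empty = PySem.Dict.empty := rfl
  rw [he] at h
  rw [h]
  rfl
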